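-- pv_equiv track=rewrite | github.com/ItalSim/legend-simulation-analysis | opticalmaptemplate/analysis/scripts/opanalysis_v3.py | get_guides
-- ===== SOURCE A (Python) =====
-- def get_guides(H, bar_width, n_bar):
--
--     """
--     H: height of the PMMA panel (where light guides will be attached)
--     bar_width: light guide width
--     n_bar: number of light guides bar to attach
--
--     remember that bar_width and n_bar should be such that bar_width * n_bar = H
--     output
--     light guides position in bins, possible empyt spaces
--     """
--
--     # Check for invalid input where n_bar is zero
--     if n_bar == 0:
--         return 0, [0], [0]
--
--     if bar_width * n_bar > H:
--         raise ValueError('A very specific bad thing happened.')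
--     # total free space between light guides
--     S = H - n_bar*bar_width
--
--     # single space between two adjacent light guides
--     s = S // (n_bar - 1)
--
--     # residual space (if != 0 you basically split it in 2 and add it at the top and bottom to make guides fit into the panel and be evenly spaced)
--     residual_space = H - n_bar*bar_width - s*(n_bar - 1)
--
--     slices = []
--     guide_position = []
--
--     # if residual space is not zero, skip corresponding zbands
--     if residual_space:
--         slices.append(0)
--
--         slices.append(residual_space)
--         guide_position.append(0)
--
--     # start always with a light guide
--     slices.append(residual_space+bar_width*2)
--     guide_position.append(1)
--
--     # increase by residual_space (if any, otherwise 0) + bar_width * 2 (because zband width = 0.5cm)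
--     counter = residual_space+bar_width*2
--
--     # loop over the entire height H of the panel
--     for i in range(n_bar-1):
--         slices.append(counter+s*2)
--         guide_position.append(0)
--
--         slices.append(counter + s*2 + bar_width*2)
--         guide_position.append(1)
--
--         counter += s*2+bar_width*2
--
--     # finish with eventual additional residual space
--     if residual_space:
--         slices.append(counter + residual_space)
--         guide_position.append(0)
--
--     return residual_space, slices, guide_position
-- ===== SOURCE B (Python) =====
-- def _prefix_sums(deltas):
--     out = []
--     total = 0
--     for d in deltas:
--         total += d
--         out.append(total)
--     return out
--
--
-- def get_guides(H, bar_width, n_bar):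
--     if n_bar == 0:
--         return 0, [0], [0]
--     if bar_width * n_bar > H:
--         raise ValueError('A very specific bad thing happened.')
--     S = H - n_bar * bar_width
--     s = S // (n_bar - 1)
--     residual_space = S - s * (n_bar - 1)
--
--     # build the list of slice increments, then prefix-sum it
--     deltas = []
--     guide_position = []
--     if residual_space:
--         deltas += [0, residual_space]
--         guide_position.append(0)
--     deltas.append(2 * bar_width)
--     guide_position.append(1)
--     for _ in range(n_bar - 1):
--         deltas += [2 * s, 2 * bar_width]
--         guide_position += [0, 1]
--     if residual_space:
--         deltas.append(residual_space)
--         guide_position.append(0)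
--
--     return residual_space, _prefix_sums(deltas), guide_position
-- ===== Notes on version B (the rewrite author's own statement) =====
-- stated objective: simpler
-- what changed: Replaces the mutable running-counter loop that appends pairs of slice endpoints with a two-pass decomposition: build the list of slice increments (deltas) plus the parallel 0/1 guide pattern, then prefix-sum the deltas once.
import Mathlib
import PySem

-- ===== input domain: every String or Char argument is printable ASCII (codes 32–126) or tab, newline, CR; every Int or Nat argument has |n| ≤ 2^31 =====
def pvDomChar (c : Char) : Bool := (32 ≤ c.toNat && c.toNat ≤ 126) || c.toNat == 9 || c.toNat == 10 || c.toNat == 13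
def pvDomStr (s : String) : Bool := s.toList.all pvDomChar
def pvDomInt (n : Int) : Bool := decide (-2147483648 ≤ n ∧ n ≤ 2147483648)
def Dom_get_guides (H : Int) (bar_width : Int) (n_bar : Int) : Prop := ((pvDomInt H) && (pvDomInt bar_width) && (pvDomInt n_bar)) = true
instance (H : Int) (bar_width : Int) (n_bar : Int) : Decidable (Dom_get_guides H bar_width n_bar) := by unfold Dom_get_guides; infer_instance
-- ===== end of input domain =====

-- B replaces A's running-counter loop by building an increment (delta) list and prefix-summing it; objective: simpler decomposition.

-- ===== PORT A =====
-- literal transliteration of A: early return, guard, then a fold threading (slices, guide_position, counter)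
def get_guides (H : Int) (bar_width : Int) (n_bar : Int) : Int × List Int × List Int :=
  if n_bar == 0 then (0, [0], [0])
  else if bar_width * n_bar > H then (0, [], [])  -- Python raises ValueError here; excluded by Pre_
  else
    let S := H - n_bar * bar_width
    let s := PySem.Int.floordiv S (n_bar - 1)  -- Python raises ZeroDivisionError when n_bar = 1; excluded by Pre_
    let residual_space := H - n_bar * bar_width - s * (n_bar - 1)
    let init : List Int × List Int :=
      if residual_space ≠ 0 then ([0, residual_space], [0]) else ([], [])
    let slices0 := init.1 ++ [residual_space + bar_width * 2]
    let gp0 := init.2 ++ [1]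
    let counter0 := residual_space + bar_width * 2
    let st := (PySem.List.pyRange 0 (n_bar - 1) 1).foldl
      (fun (st : List Int × List Int × Int) _ =>
        (st.1 ++ [st.2.2 + s * 2, st.2.2 + s * 2 + bar_width * 2],
         st.2.1 ++ [0, 1],
         st.2.2 + s * 2 + bar_width * 2))
      (slices0, gp0, counter0)
    if residual_space ≠ 0 then
      (residual_space, st.1 ++ [st.2.2 + residual_space], st.2.1 ++ [0])
    else
      (residual_space, st.1, st.2.1)

-- ===== PORT B =====
-- helper of Source B: prefix sums of a delta list (running total, no positions carried)
def prefixSums (t : Int) : List Int → List Int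
  | [] => []
  | d :: ds => (t + d) :: prefixSums (t + d) ds

def get_guides_alt (H : Int) (bar_width : Int) (n_bar : Int) : Int × List Int × List Int :=
  if n_bar == 0 then (0, [0], [0])
  else if bar_width * n_bar > H then (0, [], [])  -- Python raises ValueError here; excluded by Pre_
  else
    let S := H - n_bar * bar_width
    let s := PySem.Int.floordiv S (n_bar - 1)
    let residual_space := S - s * (n_bar - 1)
    let deltas :=
      (if residual_space ≠ 0 then [0, residual_space] else []) ++
      [2 * bar_width] ++
      (PySem.List.pyRange 0 (n_bar - 1) 1).flatMap (fun _ => [2 * s, 2 * bar_width]) ++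
      (if residual_space ≠ 0 then [residual_space] else [])
    let guide_position :=
      (if residual_space ≠ 0 then [(0 : Int)] else []) ++
      [1] ++
      (PySem.List.pyRange 0 (n_bar - 1) 1).flatMap (fun _ => [(0 : Int), 1]) ++
      (if residual_space ≠ 0 then [(0 : Int)] else [])
    (residual_space, prefixSums 0 deltas, guide_position)

-- ===== PRECONDITION & SPEC =====
-- Pre_ excludes exactly the inputs where A raises: n_bar = 1 (ZeroDivisionError) and
-- bar_width * n_bar > H with n_bar ≠ 0 (ValueError).
def Pre_get_guides (H : Int) (bar_width : Int) (n_bar : Int) : Prop :=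
  n_bar ≠ 1 ∧ (n_bar = 0 ∨ bar_width * n_bar ≤ H)
instance (H : Int) (bar_width : Int) (n_bar : Int) : Decidable (Pre_get_guides H bar_width n_bar) := by unfold Pre_get_guides; infer_instance

def pvWitness_get_guides : Int × Int × Int := (10, 2, 3)

def Spec_get_guides (H : Int) (bar_width : Int) (n_bar : Int) (out : Int × List Int × List Int) : Prop := out = get_guides_alt H bar_width n_bar
instance (H : Int) (bar_width : Int) (n_bar : Int) (out : Int × List Int × List Int) : Decidable (Spec_get_guides H bar_width n_bar out) := by unfold Spec_get_guides; infer_instance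

-- ===== CLAIM (what is proved, stated in full; the proofs are below) =====
def Claim_equal_get_guides : Prop := ∀ (H : Int) (bar_width : Int) (n_bar : Int), Dom_get_guides H bar_width n_bar → Pre_get_guides H bar_width n_bar → Spec_get_guides H bar_width n_bar (get_guides H bar_width n_bar)

-- ===== LEMMAS AND PROOFS =====

theorem prefixSums_append (t : Int) (xs ys : List Int) :
    prefixSums t (xs ++ ys) = prefixSums t xs ++ prefixSums (t + xs.sum) ys := by
  induction xs generalizing t with
  | nil => simp [prefixSums]
  | cons x xs ih => simp [prefixSums, ih, add_assoc]

-- A's loop over any index list equals appending B's prefix sums of the repeated deltas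
theorem loopA_eq {α : Type} (l : List α) (s bw : Int) (sl gp : List Int) (c : Int) :
    l.foldl
      (fun (st : List Int × List Int × Int) _ =>
        (st.1 ++ [st.2.2 + s * 2, st.2.2 + s * 2 + bw * 2],
         st.2.1 ++ [0, 1],
         st.2.2 + s * 2 + bw * 2))
      (sl, gp, c)
    = (sl ++ prefixSums c (l.flatMap (fun _ => [2 * s, 2 * bw])),
       gp ++ l.flatMap (fun _ => [(0 : Int), 1]),
       c + l.length * (2 * s + 2 * bw)) := by
  induction l generalizing sl gp c with
  | nil => simp [prefixSums]
  | cons x l ih =>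
    simp only [List.foldl_cons, ih, List.flatMap_cons, List.length_cons, Prod.mk.injEq]
    refine ⟨?_, ?_, ?_⟩
    · have h2 : c + s * 2 = c + 2 * s := by ring
      simp [prefixSums, List.append_assoc, h2]
      exact ⟨by ring, by rw [show c + 2 * s + bw * 2 = c + 2 * s + 2 * bw by ring]⟩
    · simp [List.append_assoc]
    · push_cast; ring

theorem sum_flatMap (l : List Int) (a b : Int) :
    (l.flatMap (fun _ => [a, b])).sum = l.length * (a + b) := by
  induction l with
  | nil => simp
  | cons x l ih => simp [ih]; ring

theorem get_guides_spec' (H bw n : Int) (hpre : Pre_get_guides H bw n) :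
    get_guides H bw n = get_guides_alt H bw n := by
  obtain ⟨hn1, hle⟩ := hpre
  by_cases h0 : n = 0
  · simp [get_guides, get_guides_alt, h0]
  · have hle' : bw * n ≤ H := hle.resolve_left h0
    simp only [get_guides, get_guides_alt, beq_iff_eq, h0, if_false, if_neg (not_lt.mpr hle')]
    set s := PySem.Int.floordiv (H - n * bw) (n - 1) with hs
    set r := H - n * bw - s * (n - 1) with hr
    rw [loopA_eq]
    by_cases hrz : r ≠ 0
    · simp only [if_pos hrz, Prod.mk.injEq]
      refine ⟨by trivial, ?_, by trivial⟩
      rw [prefixSums_append, prefixSums_append, prefixSums_append]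
      have h1 : r + bw * 2 = 0 + (0 + r + (2 * bw)) := by ring
      simp [prefixSums, sum_flatMap, h1]
      ring
    · simp only [if_neg hrz, Prod.mk.injEq, List.append_nil, List.nil_append]
      push Not at hrz
      refine ⟨by trivial, ?_, by trivial⟩
      rw [prefixSums_append]
      have h2 : r + bw * 2 = 0 + 2 * bw := by rw [hrz]; ring
      simp [prefixSums, h2]

-- ===== VERDICT (by name: the statement is the Claim_ definition above) =====
theorem get_guides_spec : Claim_equal_get_guides := by
  intro H bw n _ hpre
  exact get_guides_spec' H bw n hpre
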